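-- pv_equiv track=rewrite | github.com/SigridJ/beadplane | beadplane.py | getPlaneMatrix
-- ===== SOURCE A (Python) =====
-- from typing import Any, Dict, List, Optional, Tuple
--
-- def getPlaneMatrix(
--         rowLength: int,
--         rowNumber: int,
--         around: int,
--         pattern: List[str]) -> List[List[str]]:
--     """Makes a plane matrix of color codes
--
--     Parameters
--     ----------
--     rowLength : int
--     rowNumber : int
--     around: int
--     pattern : List[str]
--
--     Returns
--     -------
--     colorMatrix : List[List[str]]
--     """
--     colorMatrix: List[List[str]] = []
--     patternCounter = 0
--     odd = 0
--     for i in range(rowNumber):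
--         row = [pattern[(patternCounter + j) % len(pattern)] for j in range(rowLength + odd)]
--         colorMatrix.append(row)
--         odd = -1 if i % 2 == 0 else 0
--         patternCounter = (patternCounter + around - odd) % len(pattern)
--     return colorMatrix
-- ===== SOURCE B (Python) =====
-- from typing import List
--
-- def getPlaneMatrix(
--         rowLength: int,
--         rowNumber: int,
--         around: int,
--         pattern: List[str]) -> List[List[str]]:
--     L = len(pattern)
--     return [
--         [pattern[((i * around + (i + 1) // 2) % L + j) % L]
--          for j in range(rowLength - (i % 2))]
--         for i in range(rowNumber)
--     ]
-- ===== Notes on version B (the rewrite author's own statement) =====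
-- stated objective: alternative
-- what changed: B drops A's threaded patternCounter/odd accumulator state and computes each row independently from the closed-form start offset (i*around + (i+1)//2) % len(pattern) and row length rowLength - (i % 2).
import Mathlib
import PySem

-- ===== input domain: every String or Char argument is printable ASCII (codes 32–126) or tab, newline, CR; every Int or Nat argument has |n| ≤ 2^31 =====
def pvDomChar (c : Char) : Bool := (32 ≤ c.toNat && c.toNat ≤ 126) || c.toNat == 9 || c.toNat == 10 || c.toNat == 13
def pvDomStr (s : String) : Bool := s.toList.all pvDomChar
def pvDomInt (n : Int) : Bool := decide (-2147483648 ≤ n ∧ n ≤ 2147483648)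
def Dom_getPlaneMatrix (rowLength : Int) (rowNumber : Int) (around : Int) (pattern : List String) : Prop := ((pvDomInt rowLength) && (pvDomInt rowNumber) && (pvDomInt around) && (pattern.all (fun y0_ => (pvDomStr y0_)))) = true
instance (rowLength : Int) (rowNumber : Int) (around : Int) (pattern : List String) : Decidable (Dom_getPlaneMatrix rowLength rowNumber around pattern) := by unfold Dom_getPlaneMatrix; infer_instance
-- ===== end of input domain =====

-- B replaces A's threaded patternCounter/odd accumulator by a per-row closed-form offset (alternative decomposition, same cost).

-- ===== PORT A =====
-- Literal port of A: foldl over range(rowNumber) threading (colorMatrix, patternCounter, odd).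
def getPlaneMatrix (rowLength : Int) (rowNumber : Int) (around : Int) (pattern : List String) : List (List String) :=
  let L : Int := (pattern.length : Int)
  ((PySem.List.pyRange 0 rowNumber 1).foldl
    (fun (st : List (List String) × Int × Int) i =>
      let row := (PySem.List.pyRange 0 (rowLength + st.2.2) 1).map
        (fun j => (PySem.List.pyGet? pattern (PySem.Int.mod (st.2.1 + j) L)).getD "")
      let odd : Int := if PySem.Int.mod i 2 = 0 then -1 else 0
      (st.1 ++ [row], PySem.Int.mod (st.2.1 + around - odd) L, odd))
    ([], 0, 0)).1

-- ===== PORT B =====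
-- Literal port of B: each row built independently from a closed-form start offset.
def getPlaneMatrix_alt (rowLength : Int) (rowNumber : Int) (around : Int) (pattern : List String) : List (List String) :=
  let L : Int := (pattern.length : Int)
  (PySem.List.pyRange 0 rowNumber 1).map
    (fun i =>
      (PySem.List.pyRange 0 (rowLength - PySem.Int.mod i 2) 1).map
        (fun j => (PySem.List.pyGet? pattern
          (PySem.Int.mod (PySem.Int.mod (i * around + PySem.Int.floordiv (i + 1) 2) L + j) L)).getD ""))

-- ===== PRECONDITION & SPEC =====
-- Pre_ excludes only the inputs where A raises ZeroDivisionError (empty pattern with rowNumber ≥ 1,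
-- since patternCounter's update takes % len(pattern)); B raises there too.
def Pre_getPlaneMatrix (rowLength : Int) (rowNumber : Int) (around : Int) (pattern : List String) : Prop :=
  pattern ≠ [] ∨ rowNumber ≤ 0
instance (rowLength : Int) (rowNumber : Int) (around : Int) (pattern : List String) : Decidable (Pre_getPlaneMatrix rowLength rowNumber around pattern) := by unfold Pre_getPlaneMatrix; infer_instance

def pvWitness_getPlaneMatrix : Int × Int × Int × List String := (4, 5, 2, ["a", "b", "c"])

def Spec_getPlaneMatrix (rowLength : Int) (rowNumber : Int) (around : Int) (pattern : List String) (out : List (List String)) : Prop := out = getPlaneMatrix_alt rowLength rowNumber around pattern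
instance (rowLength : Int) (rowNumber : Int) (around : Int) (pattern : List String) (out : List (List String)) : Decidable (Spec_getPlaneMatrix rowLength rowNumber around pattern out) := by unfold Spec_getPlaneMatrix; infer_instance

-- ===== CLAIM (what is proved, stated in full; the proofs are below) =====
def Claim_equal_getPlaneMatrix : Prop := ∀ (rowLength : Int) (rowNumber : Int) (around : Int) (pattern : List String), Dom_getPlaneMatrix rowLength rowNumber around pattern → Pre_getPlaneMatrix rowLength rowNumber around pattern → Spec_getPlaneMatrix rowLength rowNumber around pattern (getPlaneMatrix rowLength rowNumber around pattern)

-- ===== LEMMAS AND PROOFS =====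

-- B's row for index i (the body of the map in getPlaneMatrix_alt).
def pvRowB (rowLength : Int) (around : Int) (pattern : List String) (i : Int) : List String :=
  (PySem.List.pyRange 0 (rowLength - PySem.Int.mod i 2) 1).map
    (fun j => (PySem.List.pyGet? pattern
      (PySem.Int.mod (PySem.Int.mod (i * around + PySem.Int.floordiv (i + 1) 2) (pattern.length : Int) + j)
        (pattern.length : Int))).getD "")

-- A's loop step.
def pvStepA (rowLength : Int) (around : Int) (pattern : List String)
    (st : List (List String) × Int × Int) (i : Int) : List (List String) × Int × Int :=
  let L : Int := (pattern.length : Int)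
  let row := (PySem.List.pyRange 0 (rowLength + st.2.2) 1).map
    (fun j => (PySem.List.pyGet? pattern (PySem.Int.mod (st.2.1 + j) L)).getD "")
  let odd : Int := if PySem.Int.mod i 2 = 0 then -1 else 0
  (st.1 ++ [row], PySem.Int.mod (st.2.1 + around - odd) L, odd)

-- Bridging rfl-lemmas between the inline port bodies and the named helpers.
theorem pvA_eq (rowLength rowNumber around : Int) (pattern : List String) :
    getPlaneMatrix rowLength rowNumber around pattern =
      ((PySem.List.pyRange 0 rowNumber 1).foldl (pvStepA rowLength around pattern) ([], 0, 0)).1 := rfl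

theorem pvB_eq (rowLength rowNumber around : Int) (pattern : List String) :
    getPlaneMatrix_alt rowLength rowNumber around pattern =
      (PySem.List.pyRange 0 rowNumber 1).map (pvRowB rowLength around pattern) := rfl

-- Loop invariant: after n iterations the state is (the first n rows of B, B's start offset for row n, -(n % 2)).
theorem pvInv (rowLength around : Int) (pattern : List String) (hp : pattern ≠ []) (n : Nat) :
    ((PySem.List.pyRange 0 (n : Int) 1).foldl (pvStepA rowLength around pattern) ([], 0, 0)) =
      ((PySem.List.pyRange 0 (n : Int) 1).map (pvRowB rowLength around pattern),
        PySem.Int.mod ((n : Int) * around + PySem.Int.floordiv ((n : Int) + 1) 2) (pattern.length : Int),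
        -((n : Int) % 2)) := by
  have hL : (0 : Int) < (pattern.length : Int) := by
    have : pattern.length ≠ 0 := by simpa using hp
    omega
  have h2 : (0 : Int) < 2 := by omega
  induction n with
  | zero =>
      simp [PySem.List.pyRange, PySem.Int.mod_eq_emod_of_pos hL]
  | succ n ih =>
      rw [show ((n + 1 : Nat) : Int) = (n : Int) + 1 by push_cast; ring,
        PySem.List.pyRange_one_succ_right (by omega : (0 : Int) ≤ (n : Int)),
        List.foldl_append, List.map_append, ih]
      simp only [List.foldl_cons, List.foldl_nil, List.map_cons, List.map_nil]
      unfold pvStepA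
      simp only [PySem.Int.mod_eq_emod_of_pos hL, PySem.Int.mod_eq_emod_of_pos h2,
        PySem.Int.floordiv_eq_ediv_of_pos h2]
      refine Prod.ext ?_ (Prod.ext ?_ ?_)
      · -- rows: the appended row is B's row n
        simp only []
        unfold pvRowB
        simp only [PySem.Int.mod_eq_emod_of_pos hL, PySem.Int.mod_eq_emod_of_pos h2,
          PySem.Int.floordiv_eq_ediv_of_pos h2]
        have hlen : rowLength + -((n : Int) % 2) = rowLength - (n : Int) % 2 := by omega
        rw [hlen]
      · -- patternCounter: fold modular arithmetic into the closed form for n+1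
        simp only []
        rw [show ∀ X c : Int, X % (pattern.length : Int) + around - c
              = X % (pattern.length : Int) + (around - c) from fun _ _ => by ring,
          Int.emod_add_emod]
        have hmul : ((n : Int) + 1) * around = (n : Int) * around + around := by ring
        split_ifs with h
        · congr 1; rw [hmul]; omega
        · congr 1; rw [hmul]; omega
      · -- odd flag
        simp only []
        split_ifs with h <;> omega

theorem getPlaneMatrix_spec : Claim_equal_getPlaneMatrix := by
  intro rowLength rowNumber around pattern _ hpre
  unfold Spec_getPlaneMatrix
  rw [pvA_eq, pvB_eq]
  by_cases hn : rowNumber ≤ 0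
  · have hempty : PySem.List.pyRange 0 rowNumber 1 = [] := by
      simp [PySem.List.pyRange]
      omega
    simp [hempty]
  · have hp : pattern ≠ [] := by
      rcases hpre with h | h
      · exact h
      · omega
    have hcast : rowNumber = ((rowNumber.toNat : Nat) : Int) := by omega
    rw [hcast, pvInv rowLength around pattern hp rowNumber.toNat]

-- ===== VERDICT (by name: the statement is the Claim_ definition above) =====
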